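-- pv_equiv track=rewrite | github.com/sreenivasanramesh/Melody | pre_processing.py | get_key_sequence
-- ===== SOURCE A (Python) =====
-- sampling_frequency = 4  # have to test with 16
--
-- def get_key_sequence(score):
--     """
--     Translates the augmented score to sequence of key presses and releases.
--     A number indicates the piano key to be pressed,
--     and end<number> represents the corresponding key release.
--     Wait<num> are lengths of time nothing is being played.
--     :param score: augmented_data from augmentation
--     :return: string of key sequences
--     """
--     processed_score = list()
--     for time_step in range(len(score)):
--         chord = score[time_step]
--         try:
--             next_chord = score[time_step + 1]
--         except IndexError:
--             next_chord = ""
--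
--         prefix = chord[0]
--         for i in range(len(chord)):
--             if chord[i] == "0":
--                 continue
--             key_position = str(i)  # piano key position
--             if chord[i] == "1":
--                 processed_score.append(key_position)  # newly played key position
--             # if chord[i]=="2" do nothing, we're continuing to hold the note
--             # unless next_chord[i] is back to 0 then end note
--             if next_chord == "" or next_chord[i] == "0":
--                 processed_score.append("end" + key_position)
--
--         if prefix.isdigit():
--             processed_score.append("wait")
--     # processed_score will be ike ['end49', 'wait', '52', 'wait', 'wait', 'wait', 'end52', 'wait', '44', 'wait'...
--
--     i = 0
--     translated_score = ""
--     # merge multiple waits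
--     while i < len(processed_score):
--         wait_count = 1
--         if processed_score[i] == 'wait':
--             while wait_count <= sampling_frequency * 2 and i + wait_count < len(processed_score) and processed_score[i + wait_count] == 'wait':
--                 wait_count += 1
--             processed_score[i] = 'wait' + str(wait_count)
--         translated_score += processed_score[i] + " "
--         i += wait_count
--     return translated_score
-- ===== SOURCE B (Python) =====
-- sampling_frequency = 4  # have to test with 16
--
--
-- def get_key_sequence(score):
--     """Single pass: pending-wait counter + output accumulator, no intermediate
--     processed_score list and no second merge scan."""
--     out = []
--     pending = 0
--     cap = sampling_frequency * 2 + 1  # largest merged wait chunk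
--
--     def flush():
--         nonlocal pending
--         while pending > 0:
--             c = min(pending, cap)
--             out.append("wait" + str(c))
--             pending -= c
--
--     n = len(score)
--     for t in range(n):
--         chord = score[t]
--         nxt = score[t + 1] if t + 1 < n else ""
--         for i in range(len(chord)):
--             c = chord[i]
--             if c == "0":
--                 continue
--             if c == "1":
--                 flush()
--                 out.append(str(i))
--             if nxt == "" or nxt[i] == "0":
--                 flush()
--                 out.append("end" + str(i))
--         if chord[0].isdigit():
--             pending += 1
--     flush()
--     return "".join(tok + " " for tok in out)
-- ===== Notes on version B (the rewrite author's own statement) =====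
-- stated objective: simpler
-- what changed: A builds a full processed_score token list and then rescans it with an index-jumping while loop to merge consecutive waits; B is a single pass that keeps a pending-wait counter and flushes it in capped chunks before each key token and at the end, with no intermediate list and no second scan.
import Mathlib
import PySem

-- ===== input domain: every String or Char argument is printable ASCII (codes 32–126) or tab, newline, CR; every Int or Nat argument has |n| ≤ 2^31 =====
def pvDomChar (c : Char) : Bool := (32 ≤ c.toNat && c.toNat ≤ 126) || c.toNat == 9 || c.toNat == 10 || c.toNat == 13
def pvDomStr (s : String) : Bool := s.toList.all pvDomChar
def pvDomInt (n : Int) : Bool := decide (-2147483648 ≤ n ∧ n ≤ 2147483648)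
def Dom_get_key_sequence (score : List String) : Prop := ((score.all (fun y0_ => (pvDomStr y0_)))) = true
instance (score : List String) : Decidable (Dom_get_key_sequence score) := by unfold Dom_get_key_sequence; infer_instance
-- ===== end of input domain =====

-- B replaces A's two passes (build processed_score, then rescan merging consecutive waits) by one
-- pass with a pending-wait counter flushed in capped chunks; the equivalence is about the return
-- value (A mutates only its local list).

-- ===== PORT A =====
-- the token "wait" (strings are handled as List Char; results are packed with String.mk)
def pvWaitTok : List Char := ['w', 'a', 'i', 't']

-- the inner while of A's merge loop: counts following 'wait' entries while wait_count <= 8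
def pvMergeCount : List (List Char) → Nat → Nat
  | _, 0 => 0
  | [], _ + 1 => 0
  | x :: r, n + 1 => if x = pvWaitTok then 1 + pvMergeCount r n else 0

-- A's second pass (the while loop over processed_score; 'i += wait_count' becomes dropping the
-- counted prefix; A's list writes only touch entries that are consumed at once)
def pvMerge : List (List Char) → List Char
  | [] => []
  | x :: rest =>
    if x = pvWaitTok then
      (pvWaitTok ++ PySem.Int.toChars ((1 + pvMergeCount rest 8 : Nat) : Int) ++ [' ']) ++
        pvMerge (rest.drop (1 + pvMergeCount rest 8 - 1))
    else (x ++ [' ']) ++ pvMerge rest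
termination_by l => l.length
decreasing_by all_goals (simp; try omega)

-- body of A's inner 'for i in range(len(chord))'.  getD with a default is used where Python would
-- raise IndexError (empty chord / too-short next chord): those inputs are outside Pre_ below.
def pvAChar (chord nxt : List Char) (acc : List (List Char)) (i : Nat) : List (List Char) :=
  if chord.getD i ' ' = '0' then acc
  else
    let key := PySem.Int.toChars ((i : Nat) : Int)
    let acc1 := if chord.getD i ' ' = '1' then acc ++ [key] else acc
    if nxt = [] ∨ nxt.getD i ' ' = '0' then acc1 ++ [['e', 'n', 'd'] ++ key] else acc1

-- body of A's outer loop; 'try: score[time_step+1] except IndexError: ""' is exactly getD (t+1) ""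
def pvAStep (score : List String) (acc : List (List Char)) (t : Nat) : List (List Char) :=
  let chord := (score.getD t "").toList
  let acc2 := (List.range chord.length).foldl (pvAChar chord (score.getD (t + 1) "").toList) acc
  if PySem.Chars.isdigit (chord.getD 0 ' ') then acc2 ++ [pvWaitTok] else acc2

-- A's first pass building processed_score
def pvProcessed (score : List String) : List (List Char) :=
  (List.range score.length).foldl (pvAStep score) []

def get_key_sequence (score : List String) : String :=
  String.mk (pvMerge (pvProcessed score))

-- ===== PORT B =====
-- B's flush(): emit pending waits in chunks of at most 9
def pvChunks (p : Nat) : List (List Char) :=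
  if p = 0 then []
  else (pvWaitTok ++ PySem.Int.toChars ((min p 9 : Nat) : Int)) :: pvChunks (p - min p 9)
termination_by p
decreasing_by omega

-- body of B's inner loop: flush pending waits, then append the key-press / key-release token
def pvAltChar (chord nxt : List Char) (st : Nat × List (List Char)) (i : Nat) : Nat × List (List Char) :=
  if chord.getD i ' ' = '0' then st
  else
    let st1 := if chord.getD i ' ' = '1' then
        (0, st.2 ++ pvChunks st.1 ++ [PySem.Int.toChars ((i : Nat) : Int)]) else st
    if nxt = [] ∨ nxt.getD i ' ' = '0' then
      (0, st1.2 ++ pvChunks st1.1 ++ [['e', 'n', 'd'] ++ PySem.Int.toChars ((i : Nat) : Int)])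
    else st1

-- body of B's outer loop: a wait time step only bumps the pending counter
def pvAltStep (score : List String) (st : Nat × List (List Char)) (t : Nat) : Nat × List (List Char) :=
  let chord := (score.getD t "").toList
  let nxt := if t + 1 < score.length then (score.getD (t + 1) "").toList else []
  let st2 := (List.range chord.length).foldl (pvAltChar chord nxt) st
  if PySem.Chars.isdigit (chord.getD 0 ' ') then (st2.1 + 1, st2.2) else st2

-- B's final flush and '"".join(tok + " " for tok in out)'
def pvRender (st : Nat × List (List Char)) : String :=
  String.mk (PySem.Chars.join [] ((st.2 ++ pvChunks st.1).map (fun tok => tok ++ [' '])))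

def get_key_sequence_alt (score : List String) : String :=
  pvRender ((List.range score.length).foldl (pvAltStep score) (0, []))

-- ===== PRECONDITION & SPEC =====
-- Pre_ excludes exactly the inputs on which Python A raises IndexError: a chord that is the empty
-- string (chord[0]), or a non-"0" chord position i with a non-empty next chord shorter than i+1
-- (next_chord[i]).
def Pre_get_key_sequence (score : List String) : Prop :=
  ∀ t ∈ List.range score.length, (score.getD t "").toList ≠ [] ∧
    ∀ i ∈ List.range (score.getD t "").toList.length,
      (score.getD t "").toList.getD i ' ' ≠ '0' →
      t + 1 < score.length → score.getD (t + 1) "" ≠ "" →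
      i < (score.getD (t + 1) "").toList.length
instance (score : List String) : Decidable (Pre_get_key_sequence score) := by
  unfold Pre_get_key_sequence; infer_instance

def pvWitness_get_key_sequence : List String := ["10", "20", "00"]

def Spec_get_key_sequence (score : List String) (out : String) : Prop := out = get_key_sequence_alt score
instance (score : List String) (out : String) : Decidable (Spec_get_key_sequence score out) := by unfold Spec_get_key_sequence; infer_instance

-- ===== CLAIM (what is proved, stated in full; the proofs are below) =====
def Claim_equal_get_key_sequence : Prop := ∀ (score : List String), Dom_get_key_sequence score → Pre_get_key_sequence score → Spec_get_key_sequence score (get_key_sequence score)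

-- ===== LEMMAS AND PROOFS =====

-- abstraction used by the proof: B's one-pass state transition, per token
def pvConsume (st : Nat × List (List Char)) (t : List Char) : Nat × List (List Char) :=
  if t = pvWaitTok then (st.1 + 1, st.2) else (0, st.2 ++ pvChunks st.1 ++ [t])

-- tokens contributed by chord position i
def pvCharToks (chord nxt : List Char) (i : Nat) : List (List Char) :=
  if chord.getD i ' ' = '0' then []
  else
    (if chord.getD i ' ' = '1' then [PySem.Int.toChars ((i : Nat) : Int)] else []) ++
    (if nxt = [] ∨ nxt.getD i ' ' = '0' then [['e', 'n', 'd'] ++ PySem.Int.toChars ((i : Nat) : Int)] else [])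

-- tokens contributed by time step t
def pvStepToks (score : List String) (t : Nat) : List (List Char) :=
  (List.range (score.getD t "").toList.length).flatMap
      (pvCharToks (score.getD t "").toList (score.getD (t + 1) "").toList) ++
    (if PySem.Chars.isdigit ((score.getD t "").toList.getD 0 ' ') then [pvWaitTok] else [])

def pvFlat (l : List (List Char)) : List Char := (l.map (fun tok => tok ++ [' '])).flatten

lemma pvChunks_zero : pvChunks 0 = [] := by rw [pvChunks]; simp

lemma pv_digitChar_ne_w (m : Nat) (hm : m < 10) : Nat.digitChar m ≠ 'w' := by
  interval_cases m <;> decide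

lemma pv_w_not_mem_toDigitsCore :
    ∀ (f n : Nat) (l : List Char), 'w' ∉ l → 'w' ∉ Nat.toDigitsCore 10 f n l := by
  intro f
  induction f with
  | zero => intro n l h; simpa [Nat.toDigitsCore] using h
  | succ f ih =>
    intro n l h
    have hd : 'w' ∉ Nat.digitChar (n % 10) :: l := by
      intro hmem
      rcases List.mem_cons.mp hmem with heq | hmem
      · exact pv_digitChar_ne_w (n % 10) (Nat.mod_lt _ (by norm_num)) heq.symm
      · exact h hmem
    simp only [Nat.toDigitsCore]
    split
    · exact hd
    · exact ih (n / 10) _ hd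

lemma pv_toChars_ne_wait (i : Nat) : PySem.Int.toChars ((i : Nat) : Int) ≠ pvWaitTok := by
  intro h
  have hnotlt : ¬ ((i : Int) < 0) := by omega
  have hmem : 'w' ∈ PySem.Int.toChars ((i : Nat) : Int) := by
    rw [h]; simp [pvWaitTok]
  rw [PySem.Int.toChars, if_neg hnotlt] at hmem
  exact pv_w_not_mem_toDigitsCore _ _ [] (by simp) hmem

lemma pv_join_nil_flat : ∀ (parts : List (List Char)), PySem.Chars.join [] parts = parts.flatten
  | [] => by simp [PySem.Chars.join_nil]
  | [p] => by simp [PySem.Chars.join, List.intercalate]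
  | p :: q :: rest => by
    rw [PySem.Chars.join_cons_cons, pv_join_nil_flat (q :: rest)]; simp

-- if every per-element action is a pvConsume-run over its tokens, the whole fold is one
lemma pv_foldl_consume_comp {α : Type} (g : α → List (List Char))
    (f : Nat × List (List Char) → α → Nat × List (List Char))
    (hf : ∀ st x, f st x = List.foldl pvConsume st (g x)) :
    ∀ (l : List α) (st : Nat × List (List Char)),
      List.foldl f st l = List.foldl pvConsume st (l.flatMap g) := by
  intro l
  induction l with
  | nil => intro st; simp
  | cons x l ih => intro st; simp [List.flatMap_cons, List.foldl_append, hf, ih]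

-- the accumulated output is only appended to
lemma pv_consume_out :
    ∀ (L : List (List Char)) (p : Nat) (out : List (List Char)),
      List.foldl pvConsume (p, out) L =
        ((List.foldl pvConsume (p, ([] : List (List Char))) L).1,
          out ++ (List.foldl pvConsume (p, ([] : List (List Char))) L).2) := by
  intro L
  induction L with
  | nil => intro p out; simp
  | cons t L ih =>
    intro p out
    by_cases h : t = pvWaitTok
    · simp only [List.foldl_cons, pvConsume, if_pos h]
      exact ih (p + 1) out
    · simp only [List.foldl_cons, pvConsume, if_neg h, List.nil_append]
      rw [ih 0 (out ++ pvChunks p ++ [t]), ih 0 (pvChunks p ++ [t])]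
      simp

lemma pv_count_rep (L : List (List Char)) (hL : ∀ x ∈ L.head?, x ≠ pvWaitTok) :
    ∀ (cap m : Nat), pvMergeCount (List.replicate m pvWaitTok ++ L) cap = min m cap := by
  intro cap
  induction cap with
  | zero => intro m; simp [pvMergeCount]
  | succ cap ih =>
    intro m
    cases m with
    | zero =>
      cases L with
      | nil => simp [pvMergeCount]
      | cons x r =>
        have hx : x ≠ pvWaitTok := hL x (by simp)
        simp [pvMergeCount, hx]
    | succ m =>
      rw [List.replicate_succ]
      simp [List.cons_append, pvMergeCount, ih m]
      omega

lemma pv_merge_rep (L : List (List Char)) (hL : ∀ x ∈ L.head?, x ≠ pvWaitTok) :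
    ∀ p, pvMerge (List.replicate p pvWaitTok ++ L) = pvFlat (pvChunks p) ++ pvMerge L := by
  intro p
  induction p using Nat.strong_induction_on with
  | _ p ih =>
    match p with
    | 0 => rw [pvChunks]; simp [pvFlat]
    | p + 1 =>
      rw [List.replicate_succ, List.cons_append, pvMerge, if_pos rfl,
        pv_count_rep L hL 8 p]
      have hdrop : (List.replicate p pvWaitTok ++ L).drop (1 + min p 8 - 1) =
          List.replicate (p - min p 8) pvWaitTok ++ L := by
        rw [Nat.add_sub_cancel_left, List.drop_append_of_le_length (by simp),
          List.drop_replicate]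
      rw [hdrop, ih (p - min p 8) (by omega)]
      conv_rhs => rw [pvChunks]
      rw [if_neg (by omega)]
      have h1 : (1 + min p 8 : Nat) = min (p + 1) 9 := by omega
      have h2 : (p - min p 8 : Nat) = p + 1 - min (p + 1) 9 := by omega
      rw [h1, h2]
      simp [pvFlat]

lemma pv_scan_merge :
    ∀ (L : List (List Char)) (p : Nat),
      pvFlat ((List.foldl pvConsume (p, ([] : List (List Char))) L).2 ++
          pvChunks (List.foldl pvConsume (p, ([] : List (List Char))) L).1) =
        pvMerge (List.replicate p pvWaitTok ++ L) := by
  intro L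
  induction L with
  | nil =>
    intro p
    rw [pv_merge_rep [] (by simp) p]
    simp [pvMerge]
  | cons t L ih =>
    intro p
    by_cases h : t = pvWaitTok
    · subst h
      simp only [List.foldl_cons, pvConsume, reduceIte]
      have hrep : List.replicate p pvWaitTok ++ pvWaitTok :: L =
          List.replicate (p + 1) pvWaitTok ++ L := by
        rw [List.replicate_succ']; simp
      rw [hrep]
      exact ih (p + 1)
    · simp only [List.foldl_cons, pvConsume, if_neg h, List.nil_append]
      rw [pv_consume_out L 0 (pvChunks p ++ [t])]
      rw [pv_merge_rep (t :: L) (by simpa using h) p]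
      rw [pvMerge, if_neg h]
      have := ih 0
      simp only [List.replicate_zero, List.nil_append] at this
      rw [← this]
      simp [pvFlat]

lemma pvAChar_eq (chord nxt : List Char) (acc : List (List Char)) (i : Nat) :
    pvAChar chord nxt acc i = acc ++ pvCharToks chord nxt i := by
  simp only [pvAChar, pvCharToks]
  split_ifs <;> simp

lemma pvAStep_eq (score : List String) (acc : List (List Char)) (t : Nat) :
    pvAStep score acc t = acc ++ pvStepToks score t := by
  simp only [pvAStep, pvStepToks]
  rw [PySem.List.foldl_congr_mem _ _
    (fun acc i => acc ++ pvCharToks (score.getD t "").toList (score.getD (t + 1) "").toList i)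
    acc (fun acc i _ => pvAChar_eq _ _ acc i), PySem.List.foldl_append_eq_flatMap]
  split_ifs <;> simp

lemma pvAltChar_eq (chord nxt : List Char) (st : Nat × List (List Char)) (i : Nat) :
    pvAltChar chord nxt st i = List.foldl pvConsume st (pvCharToks chord nxt i) := by
  simp only [pvAltChar, pvCharToks]
  split_ifs <;> simp [pvConsume, pv_toChars_ne_wait, pvChunks_zero] <;>
    simp [pvWaitTok]

lemma pvAltStep_eq (score : List String) (st : Nat × List (List Char)) (t : Nat) :
    pvAltStep score st t = List.foldl pvConsume st (pvStepToks score t) := by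
  simp only [pvAltStep]
  have hnxt : (if t + 1 < score.length then (score.getD (t + 1) "").toList else []) =
      (score.getD (t + 1) "").toList := by
    split_ifs with h
    · rfl
    · rw [List.getD_eq_default _ _ (by omega)]; rfl
  rw [hnxt, pv_foldl_consume_comp _ _ (pvAltChar_eq (score.getD t "").toList (score.getD (t + 1) "").toList)]
  simp only [pvStepToks]
  rw [List.foldl_append]
  split_ifs with hd
  · simp [pvConsume]
  · simp

lemma pv_processed_eq (score : List String) :
    pvProcessed score = (List.range score.length).flatMap (pvStepToks score) := by
  unfold pvProcessed
  rw [PySem.List.foldl_congr_mem _ _ (fun acc t => acc ++ pvStepToks score t) []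
    (fun acc t _ => pvAStep_eq score acc t), PySem.List.foldl_append_eq_flatMap]
  simp

lemma pv_alt_eq (score : List String) :
    get_key_sequence_alt score =
      String.mk (pvFlat
        ((List.foldl pvConsume (0, ([] : List (List Char)))
            ((List.range score.length).flatMap (pvStepToks score))).2 ++
          pvChunks (List.foldl pvConsume (0, ([] : List (List Char)))
            ((List.range score.length).flatMap (pvStepToks score))).1)) := by
  unfold get_key_sequence_alt pvRender
  rw [pv_foldl_consume_comp _ _ (pvAltStep_eq score), pv_join_nil_flat]
  simp [pvFlat]

-- ===== VERDICT (by name: the statement is the Claim_ definition above) =====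
theorem get_key_sequence_spec : Claim_equal_get_key_sequence := by
  unfold Claim_equal_get_key_sequence
  intro score _ _
  unfold Spec_get_key_sequence
  rw [pv_alt_eq score]
  unfold get_key_sequence
  rw [pv_processed_eq score]
  have := pv_scan_merge ((List.range score.length).flatMap (pvStepToks score)) 0
  simp only [List.replicate_zero, List.nil_append] at this
  rw [this]
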